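-- pv_equiv track=rewrite | github.com/qtgeo1248/AdventOfCode | 2021/Day23/a.py | possNextHallway
-- ===== SOURCE A (Python) =====
-- HALL = 1
--
-- ROOM = 0
--
-- def possNextHallway(board, hallx, y, takenCoords):
--     poss = []
--     goRight = True
--     goLeft = True
--     for d in range(1, len(board[hallx])):
--         if (hallx, y + d) in takenCoords:
--             goRight = False
--         if (hallx, y - d) in takenCoords:
--             goLeft = False
--         if goRight and y + d < len(board[hallx]) and board[hallx][y + d] == HALL and board[hallx + 1][y + d] != ROOM:
--             poss.append((hallx, y + d))
--         if goLeft and 0 <= y - d and board[hallx][y - d] == HALL and board[hallx + 1][y - d] != ROOM: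
--             poss.append((hallx, y - d))
--     return poss
-- ===== SOURCE B (Python) =====
-- HALL = 1
--
-- ROOM = 0
--
-- def possNextHallway(board, hallx, y, takenCoords):
--     # Scan each direction independently (break on first taken cell), then merge
--     # the two distance-keyed streams, right before left at equal distance.
--     n = len(board[hallx])
--
--     def scan(step):
--         cells = []
--         for d in range(1, n):
--             p = y + step * d
--             if (hallx, p) in takenCoords:
--                 break
--             if 0 <= p < n and board[hallx][p] == HALL and board[hallx + 1][p] != ROOM:
--                 cells.append((d, (hallx, p)))
--         return cells
--
--     rights, lefts = scan(1), scan(-1)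
--     poss = []
--     while rights or lefts:
--         if not lefts or (rights and rights[0][0] <= lefts[0][0]):
--             poss.append(rights.pop(0)[1])
--         else:
--             poss.append(lefts.pop(0)[1])
--     return poss
-- ===== Notes on version B (the rewrite author's own statement) =====
-- stated objective: alternative
-- what changed: Replaces A's single flag-carrying loop over distances with two independent directional scans that break at the first taken cell, then a merge of the two distance-keyed streams (right before left on ties).
-- outside the precondition, e.g. on possNextHallway([[1, 1, 1], [1, 1, 1]], 0, -2, set()): A returns [(0, -1), (0, 0)], B returns [(0, 0)]; on possNextHallway([[1, 1]], 0, 4, {(0, 3)}): A returns [], B returns []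
import Mathlib
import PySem

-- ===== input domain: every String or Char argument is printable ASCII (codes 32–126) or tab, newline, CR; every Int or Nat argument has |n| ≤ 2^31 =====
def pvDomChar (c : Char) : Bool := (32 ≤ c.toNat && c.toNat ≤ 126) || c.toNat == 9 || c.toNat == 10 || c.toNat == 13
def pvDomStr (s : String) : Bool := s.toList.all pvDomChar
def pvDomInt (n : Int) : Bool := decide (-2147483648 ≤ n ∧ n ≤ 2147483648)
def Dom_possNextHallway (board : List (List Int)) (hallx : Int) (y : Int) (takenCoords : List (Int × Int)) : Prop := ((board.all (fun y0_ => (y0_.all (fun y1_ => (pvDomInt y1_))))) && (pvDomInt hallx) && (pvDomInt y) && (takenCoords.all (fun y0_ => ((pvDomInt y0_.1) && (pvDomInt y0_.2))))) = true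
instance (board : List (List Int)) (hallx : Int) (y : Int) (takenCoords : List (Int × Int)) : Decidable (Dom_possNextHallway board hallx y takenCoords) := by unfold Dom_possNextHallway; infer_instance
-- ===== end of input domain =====

-- B re-decomposes A's flag-carrying single loop into two independent directional
-- scans (break at the first taken cell) merged by distance; same return value, objective: alternative decomposition.

def HALL : Int := 1
def ROOM : Int := 0

-- ===== PORT A =====
-- literal transliteration of A's loop with its two go-flags; list indexing via pyGet?
-- (exact Python semantics incl. negative-index wrap); getD defaults are never the
-- reason a branch fires on inputs admitted by Pre_ (all live indices are in range).
def possNextHallway (board : List (List Int)) (hallx : Int) (y : Int) (takenCoords : List (Int × Int)) : List (Int × Int) :=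
  let row := (PySem.List.pyGet? board hallx).getD []
  let below := (PySem.List.pyGet? board (hallx + 1)).getD []
  let n : Int := (row.length : Int)
  let fin := (PySem.List.pyRange 1 n 1).foldl
    (fun (st : List (Int × Int) × Bool × Bool) d =>
      let goRight := if takenCoords.contains (hallx, y + d) then false else st.2.1
      let goLeft := if takenCoords.contains (hallx, y - d) then false else st.2.2
      let poss := if goRight && decide (y + d < n) && ((PySem.List.pyGet? row (y + d)).getD 0 == HALL) && !((PySem.List.pyGet? below (y + d)).getD 0 == ROOM)
                  then st.1 ++ [(hallx, y + d)] else st.1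
      let poss := if goLeft && decide (0 ≤ y - d) && ((PySem.List.pyGet? row (y - d)).getD 0 == HALL) && !((PySem.List.pyGet? below (y - d)).getD 0 == ROOM)
                  then poss ++ [(hallx, y - d)] else poss
      (poss, goRight, goLeft))
    ([], true, true)
  fin.1

-- ===== PORT B =====
-- Source B's scan(step): walk the distances, stop at the first taken cell, record (d, coord)
def pvScanDir (row below : List Int) (hallx y step : Int) (taken : List (Int × Int)) : List Int → List (Int × (Int × Int))
  | [] => []
  | d :: ds =>
    let p := y + step * d
    if taken.contains (hallx, p) then []
    else if decide (0 ≤ p) && decide (p < (row.length : Int)) && ((PySem.List.pyGet? row p).getD 0 == HALL) && !((PySem.List.pyGet? below p).getD 0 == ROOM)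
      then (d, (hallx, p)) :: pvScanDir row below hallx y step taken ds
      else pvScanDir row below hallx y step taken ds

-- Source B's while-loop merging the two streams by distance, right first on ties
def pvMerge : List (Int × (Int × Int)) → List (Int × (Int × Int)) → List (Int × Int)
  | [], [] => []
  | [], l :: ls => l.2 :: pvMerge [] ls
  | r :: rs, [] => r.2 :: pvMerge rs []
  | r :: rs, l :: ls =>
      if r.1 ≤ l.1 then r.2 :: pvMerge rs (l :: ls)
      else l.2 :: pvMerge (r :: rs) ls

def possNextHallway_alt (board : List (List Int)) (hallx : Int) (y : Int) (takenCoords : List (Int × Int)) : List (Int × Int) :=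
  let row := (PySem.List.pyGet? board hallx).getD []
  let below := (PySem.List.pyGet? board (hallx + 1)).getD []
  let ds := PySem.List.pyRange 1 (row.length : Int) 1
  pvMerge (pvScanDir row below hallx y 1 takenCoords ds)
          (pvScanDir row below hallx y (-1) takenCoords ds)

-- ===== PRECONDITION & SPEC =====
-- Pre_ excludes the inputs where A raises IndexError (board[hallx] invalid, a left-hand
-- cell lookup past the row for y outside [-1, len(row)], or a below-row lookup under a
-- HALL cell that the below row does not cover, reachability of which depends on run-time
-- flags) and the inputs with y < -1, where A's unguarded right-hand read board[hallx][y+d]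
-- wraps around via Python negative indexing; A returns on some of the excluded shapes
-- (see cites) only by never reaching the unguarded lookups.
def Pre_possNextHallway (board : List (List Int)) (hallx : Int) (y : Int) (takenCoords : List (Int × Int)) : Prop :=
  (PySem.List.pyGet? board hallx).isSome ∧
  ((1 : Int) < (((PySem.List.pyGet? board hallx).getD []).length : Int) →
    -1 ≤ y ∧ y ≤ (((PySem.List.pyGet? board hallx).getD []).length : Int) ∧
    ∀ k ∈ List.range ((PySem.List.pyGet? board hallx).getD []).length,
      ((PySem.List.pyGet? board hallx).getD []).getD k 0 = HALL →
      k < ((PySem.List.pyGet? board (hallx + 1)).getD []).length)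
instance (board : List (List Int)) (hallx : Int) (y : Int) (takenCoords : List (Int × Int)) : Decidable (Pre_possNextHallway board hallx y takenCoords) := by unfold Pre_possNextHallway; infer_instance

def pvWitness_possNextHallway : List (List Int) × Int × Int × (List (Int × Int)) :=
  ([[0, 1, 1, 1, 1], [0, 0, 1, 0, 1]], 0, 2, [(0, 4)])

def Spec_possNextHallway (board : List (List Int)) (hallx : Int) (y : Int) (takenCoords : List (Int × Int)) (out : List (Int × Int)) : Prop := out = possNextHallway_alt board hallx y takenCoords
instance (board : List (List Int)) (hallx : Int) (y : Int) (takenCoords : List (Int × Int)) (out : List (Int × Int)) : Decidable (Spec_possNextHallway board hallx y takenCoords out) := by unfold Spec_possNextHallway; infer_instance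

-- ===== CLAIM (what is proved, stated in full; the proofs are below) =====
def Claim_equal_possNextHallway : Prop := ∀ (board : List (List Int)) (hallx : Int) (y : Int) (takenCoords : List (Int × Int)), Dom_possNextHallway board hallx y takenCoords → Pre_possNextHallway board hallx y takenCoords → Spec_possNextHallway board hallx y takenCoords (possNextHallway board hallx y takenCoords)

-- ===== LEMMAS AND PROOFS =====

-- every distance key produced by a scan comes from the scanned distance list
lemma pvScanDir_keys (row below : List Int) (hallx y step : Int) (taken : List (Int × Int)) :
    ∀ ds : List Int, ∀ x ∈ pvScanDir row below hallx y step taken ds, x.1 ∈ ds := by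
  intro ds
  induction ds with
  | nil => simp [pvScanDir]
  | cons d ds ih =>
    intro x hx
    simp only [pvScanDir] at hx
    split_ifs at hx with h1 h2
    · simp at hx
    · rcases List.mem_cons.1 hx with h | h
      · subst h; simp
      · exact List.mem_cons_of_mem _ (ih x h)
    · exact List.mem_cons_of_mem _ (ih x hx)

lemma pvMerge_left_small (d : Int) (c : Int × Int) (rs ls : List (Int × (Int × Int)))
    (h : ∀ x ∈ rs, d < x.1) :
    pvMerge rs ((d, c) :: ls) = c :: pvMerge rs ls := by
  cases rs with
  | nil => simp [pvMerge]
  | cons r rs =>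
    have : ¬ r.1 ≤ d := not_le.2 (h r (by simp))
    simp [pvMerge, this]

-- peeling one distance off both streams: the optional head cells come out in order
lemma pvMerge_peel (d : Int) (cr cl : Int × Int) (br bl : Bool) (rs ls : List (Int × (Int × Int)))
    (hr : ∀ x ∈ rs, d < x.1) (hl : ∀ x ∈ ls, d < x.1) :
    pvMerge ((if br then [(d, cr)] else []) ++ rs) ((if bl then [(d, cl)] else []) ++ ls)
      = (if br then [cr] else []) ++ (if bl then [cl] else []) ++ pvMerge rs ls := by
  cases br <;> cases bl
  · simp
  · simpa using pvMerge_left_small d cl rs ls hr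
  · cases ls with
    | nil => simp [pvMerge]
    | cons l ls' =>
      have hdl : (d : Int) ≤ l.1 := le_of_lt (hl l (by simp))
      simp [pvMerge, hdl]
  · have h1 : pvMerge ((d, cr) :: rs) ((d, cl) :: ls) = cr :: pvMerge rs ((d, cl) :: ls) := by
      simp [pvMerge]
    simp [h1, pvMerge_left_small d cl rs ls hr]

-- the main loop invariant: A's flagged fold over ds equals acc ++ merge of B's two scans
lemma pvFold_eq_merge (row below : List Int) (hallx y : Int) (taken : List (Int × Int))
    (hy1 : -1 ≤ y) (hy2 : y ≤ (row.length : Int)) :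
    ∀ (ds : List Int), ds.Pairwise (· < ·) → (∀ d ∈ ds, 1 ≤ d) →
    ∀ (acc : List (Int × Int)) (gR gL : Bool),
    (ds.foldl
      (fun (st : List (Int × Int) × Bool × Bool) d =>
        let goRight := if taken.contains (hallx, y + d) then false else st.2.1
        let goLeft := if taken.contains (hallx, y - d) then false else st.2.2
        let poss := if goRight && decide (y + d < (row.length : Int)) && ((PySem.List.pyGet? row (y + d)).getD 0 == HALL) && !((PySem.List.pyGet? below (y + d)).getD 0 == ROOM)
                    then st.1 ++ [(hallx, y + d)] else st.1
        let poss := if goLeft && decide (0 ≤ y - d) && ((PySem.List.pyGet? row (y - d)).getD 0 == HALL) && !((PySem.List.pyGet? below (y - d)).getD 0 == ROOM)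
                    then poss ++ [(hallx, y - d)] else poss
        (poss, goRight, goLeft))
      (acc, gR, gL)).1
    = acc ++ pvMerge (if gR then pvScanDir row below hallx y 1 taken ds else [])
                     (if gL then pvScanDir row below hallx y (-1) taken ds else []) := by
  intro ds
  induction ds with
  | nil => intro _ _ acc gR gL; simp [pvScanDir, pvMerge]
  | cons d ds ih =>
    intro hpair hmem acc gR gL
    have hd1 : (1 : Int) ≤ d := hmem d (by simp)
    have hpair' : ds.Pairwise (· < ·) := (List.pairwise_cons.1 hpair).2
    have hlt : ∀ x ∈ ds, d < x := (List.pairwise_cons.1 hpair).1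
    have hmem' : ∀ e ∈ ds, 1 ≤ e := fun e he => hmem e (List.mem_cons_of_mem _ he)
    have hdr : decide (0 ≤ y + d) = true := by simp only [decide_eq_true_eq]; omega
    have hdl : decide (y - d < (row.length : Int)) = true := by
      simp only [decide_eq_true_eq]; omega
    have hSR : pvScanDir row below hallx y 1 taken (d :: ds)
        = if taken.contains (hallx, y + d) then []
          else (if decide (y + d < (row.length : Int)) && ((PySem.List.pyGet? row (y + d)).getD 0 == HALL) && !((PySem.List.pyGet? below (y + d)).getD 0 == ROOM)
                then [(d, (hallx, y + d))] else []) ++ pvScanDir row below hallx y 1 taken ds := by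
      simp only [pvScanDir, one_mul, hdr, Bool.true_and]
      split_ifs <;> simp
    have hSL : pvScanDir row below hallx y (-1) taken (d :: ds)
        = if taken.contains (hallx, y - d) then []
          else (if decide (0 ≤ y - d) && ((PySem.List.pyGet? row (y - d)).getD 0 == HALL) && !((PySem.List.pyGet? below (y - d)).getD 0 == ROOM)
                then [(d, (hallx, y - d))] else []) ++ pvScanDir row below hallx y (-1) taken ds := by
      have hp : y + (-1) * d = y - d := by ring
      simp only [pvScanDir, hp, hdl, Bool.and_true]
      split_ifs with h1 h2 _ <;> simp_all
    have hkR : ∀ x ∈ pvScanDir row below hallx y 1 taken ds, d < x.1 :=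
      fun x hx => hlt _ (pvScanDir_keys row below hallx y 1 taken ds x hx)
    have hkL : ∀ x ∈ pvScanDir row below hallx y (-1) taken ds, d < x.1 :=
      fun x hx => hlt _ (pvScanDir_keys row below hallx y (-1) taken ds x hx)
    have hR2 : (if gR then pvScanDir row below hallx y 1 taken (d :: ds) else [])
        = (if (if taken.contains (hallx, y + d) then false else gR) && (decide (y + d < (row.length : Int)) && ((PySem.List.pyGet? row (y + d)).getD 0 == HALL) && !((PySem.List.pyGet? below (y + d)).getD 0 == ROOM)) then [(d, (hallx, y + d))] else [])
          ++ (if (if taken.contains (hallx, y + d) then false else gR) then pvScanDir row below hallx y 1 taken ds else []) := by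
      rw [hSR]; cases gR <;> cases hmv : taken.contains (hallx, y + d) <;> simp [hmv]
    have hL2 : (if gL then pvScanDir row below hallx y (-1) taken (d :: ds) else [])
        = (if (if taken.contains (hallx, y - d) then false else gL) && (decide (0 ≤ y - d) && ((PySem.List.pyGet? row (y - d)).getD 0 == HALL) && !((PySem.List.pyGet? below (y - d)).getD 0 == ROOM)) then [(d, (hallx, y - d))] else [])
          ++ (if (if taken.contains (hallx, y - d) then false else gL) then pvScanDir row below hallx y (-1) taken ds else []) := by
      rw [hSL]; cases gL <;> cases hmv : taken.contains (hallx, y - d) <;> simp [hmv]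
    have hkR' : ∀ x ∈ (if (if taken.contains (hallx, y + d) then false else gR) then pvScanDir row below hallx y 1 taken ds else []), d < x.1 := by
      intro x hx
      by_cases h : (if taken.contains (hallx, y + d) then false else gR) = true
      · rw [if_pos h] at hx; exact hkR x hx
      · rw [if_neg h] at hx; simp at hx
    have hkL' : ∀ x ∈ (if (if taken.contains (hallx, y - d) then false else gL) then pvScanDir row below hallx y (-1) taken ds else []), d < x.1 := by
      intro x hx
      by_cases h : (if taken.contains (hallx, y - d) then false else gL) = true
      · rw [if_pos h] at hx; exact hkL x hx
      · rw [if_neg h] at hx; simp at hx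
    simp only [List.foldl_cons]
    rw [ih hpair' hmem', hR2, hL2,
      pvMerge_peel d (hallx, y + d) (hallx, y - d) _ _ _ _ hkR' hkL']
    simp only [Bool.and_assoc]
    split_ifs <;> simp


-- ===== VERDICT (by name: the statement is the Claim_ definition above) =====
theorem possNextHallway_spec : Claim_equal_possNextHallway := by
  intro board hallx y taken _ hpre
  obtain ⟨hsome, himp⟩ := hpre
  show possNextHallway board hallx y taken = possNextHallway_alt board hallx y taken
  by_cases hn : (1 : Int) < (((PySem.List.pyGet? board hallx).getD []).length : Int)
  · obtain ⟨hy1, hy2, _⟩ := himp hn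
    have h := pvFold_eq_merge ((PySem.List.pyGet? board hallx).getD [])
      ((PySem.List.pyGet? board (hallx + 1)).getD []) hallx y taken hy1 hy2
      (PySem.List.pyRange 1 ((((PySem.List.pyGet? board hallx).getD []).length : Int)) 1)
      (PySem.List.pairwise_lt_pyRange_one _ _)
      (fun e he => (PySem.List.mem_pyRange_one.1 he).1) [] true true
    simpa [possNextHallway, possNextHallway_alt] using h
  · have hnil : PySem.List.pyRange 1 ((((PySem.List.pyGet? board hallx).getD []).length : Int)) 1 = [] :=
      PySem.List.pyRange_one_eq_nil (by omega)
    simp [possNextHallway, possNextHallway_alt, hnil, pvScanDir, pvMerge]
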